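-- pv_equiv track=rewrite | github.com/upesacm/100DaysOfCode-2025 | DSA/Samarth_Jakhmola_590018000/Day_61/Day_61_Question_01.py | min_heap_to_max_heap
-- ===== SOURCE A (Python) =====
-- def min_heap_to_max_heap(arr):
--     n = len(arr)
--
--     # Heapify a subtree rooted at index i for max heap
--     def max_heapify(i):
--         largest = i
--         left = 2 * i + 1
--         right = 2 * i + 2
--
--         # Check if left child exists and is greater than root
--         if left < n and arr[left] > arr[largest]:
--             largest = left
--
--         # Check if right child exists and is greater than current largest
--         if right < n and arr[right] > arr[largest]:
--             largest = right
--
--         # If largest is not root, swap and heapify the affected subtree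
--         if largest != i:
--             arr[i], arr[largest] = arr[largest], arr[i]
--             max_heapify(largest)
--
--     # Start from last non-leaf node and heapify each node
--     for i in range(n //2 - 1, -1, -1):
--         max_heapify(i)
--
--     return arr
-- ===== SOURCE B (Python) =====
-- def min_heap_to_max_heap(arr):
--     n = len(arr)
--     # Same bottom-up heap construction, but the recursive max_heapify is
--     # replaced by an iterative sift-down; the candidate parent/children are
--     # compared via max() over the index list (first maximum wins, which
--     # reproduces A's strict-> left-before-right tie-breaking exactly).
--     for i in reversed(range(n // 2)):
--         cur = i
--         while True:
--             kids = [c for c in (2 * cur + 1, 2 * cur + 2) if c < n]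
--             largest = max([cur] + kids, key=lambda j: arr[j])
--             if largest == cur:
--                 break
--             arr[cur], arr[largest] = arr[largest], arr[cur]
--             cur = largest
--     return arr
-- ===== Notes on version B (the rewrite author's own statement) =====
-- stated objective: alternative
-- what changed: The recursive max_heapify with its hand-written two-branch comparison chain is replaced by an iterative sift-down that picks the largest of parent and existing children with a single first-maximum max() over the candidate index list.
import Mathlib
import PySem

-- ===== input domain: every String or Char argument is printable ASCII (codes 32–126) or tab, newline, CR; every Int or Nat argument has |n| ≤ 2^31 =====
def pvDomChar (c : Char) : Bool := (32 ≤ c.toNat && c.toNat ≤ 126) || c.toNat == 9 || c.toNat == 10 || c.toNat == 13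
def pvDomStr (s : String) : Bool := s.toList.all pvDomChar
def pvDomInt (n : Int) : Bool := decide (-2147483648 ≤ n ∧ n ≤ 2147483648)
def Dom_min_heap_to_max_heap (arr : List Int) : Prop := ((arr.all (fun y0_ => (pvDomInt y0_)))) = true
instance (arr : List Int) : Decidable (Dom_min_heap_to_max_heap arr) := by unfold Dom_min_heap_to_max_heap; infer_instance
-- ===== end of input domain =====

-- B replaces the recursive max_heapify by an iterative sift-down using a first-maximum
-- max() over the candidate indices; both A and B mutate the argument list in place and
-- return it — the equivalence proved here is about the returned value.

-- ===== PORT A =====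
-- the comparison chain of max_heapify, split out so the recursion can cite its bounds
def largestA (n : Nat) (arr : List Int) (i : Nat) : Nat :=
  let left := 2 * i + 1
  let right := 2 * i + 2
  let g1 := if left < n ∧ arr.getD i 0 < arr.getD left 0 then left else i
  if right < n ∧ arr.getD g1 0 < arr.getD right 0 then right else g1

theorem largestA_bounds (n : Nat) (arr : List Int) (i : Nat)
    (h : largestA n arr i ≠ i) : i < largestA n arr i ∧ largestA n arr i < n := by
  unfold largestA at *
  dsimp only at *
  split_ifs at * <;> omega

-- max_heapify: recursion on the affected subtree, simultaneous swap via two set's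
def max_heapifyA (n : Nat) (arr : List Int) (i : Nat) : List Int :=
  let largest := largestA n arr i
  if h : largest ≠ i then
    max_heapifyA n ((arr.set i (arr.getD largest 0)).set largest (arr.getD i 0)) largest
  else arr
termination_by n - i
decreasing_by
  have := largestA_bounds n arr i h
  omega

def min_heap_to_max_heap (arr : List Int) : List Int :=
  let n := arr.length
  (PySem.List.pyRange (PySem.Int.floordiv (n : Int) 2 - 1) (-1) (-1)).foldl
    (fun a i => max_heapifyA n a i.toNat) arr

-- ===== PORT B =====
-- largest of parent and existing children, as python's first-maximum max() with key
def largestB (n : Nat) (arr : List Int) (cur : Nat) : Nat :=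
  let kids := [2 * cur + 1, 2 * cur + 2].filter (fun c => c < n)
  (PySem.List.max? (cur :: kids) (fun j => arr.getD j 0)).getD cur

theorem largestB_bounds (n : Nat) (arr : List Int) (cur : Nat)
    (h : largestB n arr cur ≠ cur) : cur < largestB n arr cur ∧ largestB n arr cur < n := by
  unfold largestB at h ⊢
  dsimp only at h ⊢
  cases hm : PySem.List.max? (cur :: [2 * cur + 1, 2 * cur + 2].filter (fun c => c < n))
      (fun j => arr.getD j 0) with
  | none => rw [hm] at h; simp at h
  | some m =>
    have hmem := PySem.List.max?_mem hm
    rw [hm] at h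
    simp only [Option.getD_some] at h ⊢
    simp only [List.mem_cons, List.mem_filter, decide_eq_true_eq] at hmem
    rcases hmem with rfl | hk
    · exact absurd rfl h
    · simp at hk; omega

-- the while-True sift-down loop of B
def siftB (n : Nat) (arr : List Int) (cur : Nat) : List Int :=
  let largest := largestB n arr cur
  if h : largest = cur then arr
  else siftB n ((arr.set cur (arr.getD largest 0)).set largest (arr.getD cur 0)) largest
termination_by n - cur
decreasing_by
  have := largestB_bounds n arr cur h
  omega

def min_heap_to_max_heap_alt (arr : List Int) : List Int :=
  let n := arr.length
  ((List.range (n / 2)).reverse).foldl (fun a i => siftB n a i) arr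

-- ===== PRECONDITION & SPEC =====
def Spec_min_heap_to_max_heap (arr : List Int) (out : List Int) : Prop := out = min_heap_to_max_heap_alt arr
instance (arr : List Int) (out : List Int) : Decidable (Spec_min_heap_to_max_heap arr out) := by unfold Spec_min_heap_to_max_heap; infer_instance

-- ===== CLAIM (what is proved, stated in full; the proofs are below) =====
def Claim_equal_min_heap_to_max_heap : Prop := ∀ (arr : List Int), Dom_min_heap_to_max_heap arr → Spec_min_heap_to_max_heap arr (min_heap_to_max_heap arr)

-- ===== LEMMAS AND PROOFS =====

-- the two "largest" computations agree
theorem largest_eq (n : Nat) (arr : List Int) (i : Nat) :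
    largestB n arr i = largestA n arr i := by
  unfold largestA largestB
  dsimp only
  by_cases hl : 2 * i + 1 < n <;> by_cases hr : 2 * i + 2 < n <;>
    simp [PySem.List.max?, List.foldl, List.filter, hl, hr] <;>
      split_ifs <;> simp_all <;> split_ifs <;> simp_all <;> omega

-- one recursive heapify step for step: A's recursion and B's loop coincide
theorem sift_eq_aux (n : Nat) (k : Nat) :
    ∀ (i : Nat) (arr : List Int), n - i ≤ k → max_heapifyA n arr i = siftB n arr i := by
  induction k with
  | zero =>
    intro i arr h
    rw [max_heapifyA, siftB, largest_eq]
    have : largestA n arr i = i := by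
      by_contra hne
      have := largestA_bounds n arr i hne
      omega
    simp [this]
  | succ k ih =>
    intro i arr h
    rw [max_heapifyA, siftB, largest_eq]
    by_cases hne : largestA n arr i = i
    · simp [hne]
    · have hb := largestA_bounds n arr i hne
      rw [dif_pos hne, dif_neg hne]
      refine ih _ _ ?_
      omega

theorem sift_eq (n i : Nat) (arr : List Int) : max_heapifyA n arr i = siftB n arr i :=
  sift_eq_aux n (n - i) i arr le_rfl

-- the two outer loops traverse the same indices n//2-1 … 0
theorem fold_eq (n : Nat) : ∀ (m : Nat) (arr : List Int),
    (PySem.List.pyRange ((m : Int) - 1) (-1) (-1)).foldl (fun a i => max_heapifyA n a i.toNat) arr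
      = ((List.range m).reverse).foldl (fun a i => siftB n a i) arr := by
  intro m
  induction m with
  | zero =>
    intro arr
    rw [PySem.List.pyRange_neg_one_eq_nil (by norm_num)]
    simp
  | succ m ih =>
    intro arr
    have h1 : ((m + 1 : Nat) : Int) - 1 = (m : Int) := by push_cast; ring
    rw [h1, PySem.List.pyRange_neg_one_cons (by omega)]
    rw [List.range_succ, List.reverse_append]
    simp only [List.reverse_singleton, List.singleton_append, List.foldl_cons]
    rw [Int.toNat_natCast, sift_eq]
    exact ih _


theorem floordiv_two (n : Nat) : PySem.Int.floordiv (n : Int) 2 = ((n / 2 : Nat) : Int) := by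
  simp [PySem.Int.floordiv, Int.fdiv_eq_ediv]

-- ===== VERDICT (by name: the statement is the Claim_ definition above) =====
theorem min_heap_to_max_heap_spec : Claim_equal_min_heap_to_max_heap := by
  intro arr _
  unfold Spec_min_heap_to_max_heap min_heap_to_max_heap min_heap_to_max_heap_alt
  show (PySem.List.pyRange (PySem.Int.floordiv ((arr.length : Int)) 2 - 1) (-1) (-1)).foldl
      (fun a i => max_heapifyA arr.length a i.toNat) arr
    = ((List.range (arr.length / 2)).reverse).foldl (fun a i => siftB arr.length a i) arr
  rw [floordiv_two, fold_eq]
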